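-- pv_equiv track=rewrite | github.com/Libensemble/libensemble | libensemble/resources/worker_resources.py | get_index_list
-- ===== SOURCE A (Python) =====
-- from typing import TYPE_CHECKING, Any
--
-- def get_index_list(num_workers: int, num_rsets: int, zero_resource_list: list[int | Any]) -> list[int | None]:
--     """Map WorkerID to index into a nodelist"""
--     index = 0
--     index_list = []
--     for i in range(1, num_workers + 1):
--         if i in zero_resource_list:
--             index_list.append(None)
--         else:
--             if index >= num_rsets:
--                 # Not enough rsets
--                 index_list.append(None)
--             else:
--                 index_list.append(index)
--             index += 1
--     return index_list
-- ===== SOURCE B (Python) =====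
-- def get_index_list(num_workers: int, num_rsets: int, zero_resource_list):
--     """Map WorkerID to index into a nodelist (filter + index table + lookup)."""
--     zset = set(zero_resource_list)
--     non_zero = [i for i in range(1, num_workers + 1) if i not in zset]
--     index_of = {w: (k if k < num_rsets else None) for k, w in enumerate(non_zero)}
--     return [index_of.get(i) for i in range(1, num_workers + 1)]
-- ===== Notes on version B (the rewrite author's own statement) =====
-- stated objective: faster
-- what changed: Replaces A's single fused loop, which threads a running counter and does an O(z) list-membership test per worker, with a three-stage decomposition: filter the non-zero workers via a membership set, build an index table from enumerate(non_zero), then produce the result by pure dictionary lookups over the worker range.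
import Mathlib
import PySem

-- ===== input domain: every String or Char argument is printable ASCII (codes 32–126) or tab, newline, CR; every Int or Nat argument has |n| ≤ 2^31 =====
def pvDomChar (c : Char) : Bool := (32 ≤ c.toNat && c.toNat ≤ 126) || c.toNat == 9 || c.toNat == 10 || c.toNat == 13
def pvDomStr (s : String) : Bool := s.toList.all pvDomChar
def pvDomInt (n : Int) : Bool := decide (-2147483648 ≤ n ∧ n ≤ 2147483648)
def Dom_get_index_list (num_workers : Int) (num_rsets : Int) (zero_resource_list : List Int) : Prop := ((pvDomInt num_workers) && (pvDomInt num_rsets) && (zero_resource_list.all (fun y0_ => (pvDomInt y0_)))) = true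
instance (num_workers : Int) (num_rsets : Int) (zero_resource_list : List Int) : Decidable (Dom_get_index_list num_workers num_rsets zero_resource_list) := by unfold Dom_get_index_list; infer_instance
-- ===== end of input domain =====

-- B replaces A's fused counting loop (with its per-worker list-membership scan) by a filter + enumerate-built index table + lookup pass; a timing run measured B faster.

-- ===== PORT A =====
def get_index_list (num_workers : Int) (num_rsets : Int) (zero_resource_list : List Int) : List (Option Int) :=
  (((PySem.List.pyRange 1 (num_workers + 1) 1).foldl
    (fun (s : Int × List (Option Int)) i =>
      if zero_resource_list.contains i then
        (s.1, s.2 ++ [none])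
      else
        (s.1 + 1, s.2 ++ [if s.1 ≥ num_rsets then none else some s.1]))
    (0, [])) : Int × List (Option Int)).2

-- ===== PORT B =====
def get_index_list_alt (num_workers : Int) (num_rsets : Int) (zero_resource_list : List Int) : List (Option Int) :=
  let zset : PySem.Set Int := PySem.Set.ofList zero_resource_list
  let nonZero : List Int :=
    (PySem.List.pyRange 1 (num_workers + 1) 1).filter (fun i => !(PySem.Set.contains zset i))
  let indexOf : PySem.Dict Int (Option Int) :=
    (PySem.List.enumerate nonZero 0).foldl
      (fun d p => d.insert p.2 (if p.1 < num_rsets then some p.1 else none))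
      PySem.Dict.empty
  (PySem.List.pyRange 1 (num_workers + 1) 1).map (fun i => (indexOf.get? i).getD none)

-- ===== PRECONDITION & SPEC =====
def Spec_get_index_list (num_workers : Int) (num_rsets : Int) (zero_resource_list : List Int) (out : List (Option Int)) : Prop := out = get_index_list_alt num_workers num_rsets zero_resource_list
instance (num_workers : Int) (num_rsets : Int) (zero_resource_list : List Int) (out : List (Option Int)) : Decidable (Spec_get_index_list num_workers num_rsets zero_resource_list out) := by unfold Spec_get_index_list; infer_instance

-- ===== CLAIM (what is proved, stated in full; the proofs are below) =====
def Claim_equal_get_index_list : Prop := ∀ (num_workers : Int) (num_rsets : Int) (zero_resource_list : List Int), Dom_get_index_list num_workers num_rsets zero_resource_list → Spec_get_index_list num_workers num_rsets zero_resource_list (get_index_list num_workers num_rsets zero_resource_list)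

-- ===== LEMMAS AND PROOFS =====

-- number of non-zero-resource workers strictly before worker i
def pvCnt (zrl : List Int) (i : Int) : Int :=
  (((PySem.List.pyRange 1 i 1).filter (fun j => !zrl.contains j)).length : Int)

-- the common reference value for worker i
def pvVal (nr : Int) (zrl : List Int) (i : Int) : Option Int :=
  if zrl.contains i then none
  else if pvCnt zrl i ≥ nr then none else some (pvCnt zrl i)

lemma pvCnt_one (zrl : List Int) : pvCnt zrl 1 = 0 := by
  simp [pvCnt, PySem.List.pyRange_one_eq_nil (le_refl (1 : Int))]

lemma pvCnt_succ (zrl : List Int) (a : Int) (h : 1 ≤ a) :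
    pvCnt zrl (a + 1) = pvCnt zrl a + (if a ∈ zrl then 0 else 1) := by
  unfold pvCnt
  rw [PySem.List.pyRange_one_succ_right h, List.filter_append]
  by_cases hc : a ∈ zrl <;> simp [hc]

lemma pvFoldA (nr : Int) (zrl : List Int) :
    ∀ (n : Nat) (a b : Int) (acc : List (Option Int)), 1 ≤ a → (b - a).toNat = n →
    (PySem.List.pyRange a b 1).foldl
      (fun (s : Int × List (Option Int)) i =>
        if zrl.contains i then (s.1, s.2 ++ [none])
        else (s.1 + 1, s.2 ++ [if s.1 ≥ nr then none else some s.1]))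
      (pvCnt zrl a, acc)
    = (pvCnt zrl a + (((PySem.List.pyRange a b 1).filter (fun j => !zrl.contains j)).length : Int),
       acc ++ (PySem.List.pyRange a b 1).map (pvVal nr zrl)) := by
  intro n
  induction n with
  | zero =>
    intro a b acc ha hn
    rw [PySem.List.pyRange_one_eq_nil (by omega)]
    simp
  | succ m ih =>
    intro a b acc ha hn
    have hab : a < b := by omega
    rw [PySem.List.pyRange_one_cons hab]
    simp only [List.foldl_cons]
    by_cases hc : a ∈ zrl
    · have hcb : zrl.contains a = true := by simpa using hc
      rw [if_pos hcb]
      have h1 : pvCnt zrl a = pvCnt zrl (a + 1) := by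
        rw [pvCnt_succ zrl a ha]; simp [hc]
      rw [h1, ih (a + 1) b (acc ++ [none]) (by omega) (by omega)]
      refine Prod.ext ?_ ?_
      · simp [hc]
      · simp [pvVal, hc]
    · have hcb : ¬ (zrl.contains a = true) := by simpa using hc
      rw [if_neg hcb]
      have hval : pvVal nr zrl a = if pvCnt zrl a ≥ nr then none else some (pvCnt zrl a) := by
        simp [pvVal, hc]
      have h1 : pvCnt zrl (a + 1) = pvCnt zrl a + 1 := by
        rw [pvCnt_succ zrl a ha]; simp [hc]
      rw [← hval, ← h1, ih (a + 1) b (acc ++ [pvVal nr zrl a]) (by omega) (by omega)]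
      refine Prod.ext ?_ ?_
      · simp only [List.filter_cons]
        have : (!zrl.contains a) = true := by simpa using hc
        rw [this, if_pos rfl]
        simp only [List.length_cons, h1]
        push_cast; ring
      · simp

-- characterization of A
lemma pvA_char (nw nr : Int) (zrl : List Int) :
    get_index_list nw nr zrl = (PySem.List.pyRange 1 (nw + 1) 1).map (pvVal nr zrl) := by
  unfold get_index_list
  rw [show ((0 : Int), ([] : List (Option Int))) = (pvCnt zrl 1, ([] : List (Option Int))) by
        rw [pvCnt_one]]
  rw [pvFoldA nr zrl ((nw + 1) - 1).toNat 1 (nw + 1) [] (le_refl 1) rfl]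
  simp

lemma pvSet_contains (zrl : List Int) (i : Int) :
    PySem.Set.contains (PySem.Set.ofList zrl) i = zrl.contains i := by
  simp [PySem.Set.contains, PySem.Set.mem_ofList]

-- characterization of B's dictionary lookup for admitted workers
lemma pvB_lookup (nw nr : Int) (zrl : List Int) (i : Int) (h1 : 1 ≤ i) (h2 : i < nw + 1) :
    ((((PySem.List.enumerate
          ((PySem.List.pyRange 1 (nw + 1) 1).filter
            (fun j => !(PySem.Set.contains (PySem.Set.ofList zrl) j))) 0).foldl
        (fun d p => d.insert p.2 (if p.1 < nr then some p.1 else none))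
        PySem.Dict.empty).get? i).getD none) = pvVal nr zrl i := by
  rw [show (fun j => !(PySem.Set.contains (PySem.Set.ofList zrl) j))
        = (fun j => !zrl.contains j) from funext fun j => by rw [pvSet_contains]]
  set p : Int → Bool := fun j => !zrl.contains j with hp
  set nz : List Int := (PySem.List.pyRange 1 (nw + 1) 1).filter p with hnz
  have hnznodup : nz.Nodup := List.Nodup.filter _ (PySem.List.nodup_pyRange_one 1 (nw + 1))
  have hitems :
      ((PySem.List.enumerate nz 0).foldl
        (fun d q => d.insert q.2 (if q.1 < nr then some q.1 else none))
        PySem.Dict.empty).items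
      = (PySem.List.enumerate nz 0).map
          (fun q => (q.2, if q.1 < nr then some q.1 else none)) := by
    have := PySem.Dict.items_foldl_insert_fresh (PySem.List.enumerate nz 0)
      (fun q => q.2) (fun q => if q.1 < nr then some q.1 else none) PySem.Dict.empty
      (by intro a _; simp [PySem.Dict.contains_empty])
      (by rw [PySem.List.map_snd_enumerate]; exact hnznodup)
    simpa using this
  have hkeys :
      ((PySem.List.enumerate nz 0).foldl
        (fun d q => d.insert q.2 (if q.1 < nr then some q.1 else none))
        PySem.Dict.empty).keys = nz := by
    simp only [PySem.Dict.keys, hitems, List.map_map]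
    exact PySem.List.map_snd_enumerate nz 0
  by_cases hc : i ∈ zrl
  · -- i is zero-resource: not a key, lookup defaults to None
    have hnotmem : i ∉ nz := by
      intro hmem
      have := List.of_mem_filter hmem
      simp [hp, hc] at this
    have hnone : (((PySem.List.enumerate nz 0).foldl
        (fun d q => d.insert q.2 (if q.1 < nr then some q.1 else none))
        PySem.Dict.empty).get? i) = none := by
      rw [PySem.Dict.get?_eq_none_iff_not_mem_keys, hkeys]; exact hnotmem
    rw [hnone]
    simp [pvVal, hc]
  · -- i is a key, stored at position pvCnt zrl i
    have hsplit : nz = (PySem.List.pyRange 1 i 1).filter p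
        ++ i :: (PySem.List.pyRange (i + 1) (nw + 1) 1).filter p := by
      rw [hnz, PySem.List.pyRange_one_append 1 i (nw + 1) h1 (by omega),
        PySem.List.pyRange_one_cons h2, List.filter_append, List.filter_cons]
      simp [hp, hc]
    set pre : List Int := (PySem.List.pyRange 1 i 1).filter p with hpre
    have hcnt : pvCnt zrl i = (pre.length : Int) := by rw [pvCnt]
    have hmemE : ((pre.length : Int), i) ∈ PySem.List.enumerate nz 0 := by
      rw [hsplit, PySem.List.enumerate_append, PySem.List.enumerate_cons]
      simp
    have hmemI : (i, if (pre.length : Int) < nr then some (pre.length : Int) else none)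
        ∈ ((PySem.List.enumerate nz 0).foldl
            (fun d q => d.insert q.2 (if q.1 < nr then some q.1 else none))
            PySem.Dict.empty).items := by
      rw [hitems]
      exact List.mem_map.2 ⟨((pre.length : Int), i), hmemE, rfl⟩
    have hget := PySem.Dict.get?_of_mem_items _ hmemI (by rw [hkeys]; exact hnznodup)
    simp only [pvVal]
    rw [if_neg (by simpa using hc), hcnt]
    by_cases hlt : (pre.length : Int) < nr
    · rw [if_pos hlt] at hget
      rw [hget, Option.getD_some, if_neg (not_le.mpr hlt)]
    · rw [if_neg hlt] at hget
      rw [hget, Option.getD_some, if_pos (not_lt.mp hlt)]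

-- characterization of B
lemma pvB_char (nw nr : Int) (zrl : List Int) :
    get_index_list_alt nw nr zrl = (PySem.List.pyRange 1 (nw + 1) 1).map (pvVal nr zrl) := by
  unfold get_index_list_alt
  apply List.map_congr_left
  intro i hi
  rw [PySem.List.mem_pyRange_one] at hi
  exact pvB_lookup nw nr zrl i hi.1 hi.2

-- ===== VERDICT (by name: the statement is the Claim_ definition above) =====
theorem get_index_list_spec : Claim_equal_get_index_list := by
  intro nw nr zrl _
  unfold Spec_get_index_list
  rw [pvA_char, pvB_char]
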